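-- pv_equiv track=rewrite | github.com/davidcagoh/algorithmooc | course_2/module_4_assignment/2sum_optimised.py | check_sums
-- ===== SOURCE A (Python) =====
-- def check_sums(integers):
--     arr = sorted(set(integers))   # dedup helps
--     lo, hi = 0, len(arr) - 1
--     valid = set()
--
--     while lo < hi:
--         s = arr[lo] + arr[hi]
--         if s < -10000:
--             lo += 1
--         elif s > 10000:
--             hi -= 1
--         else:
--             # record all sums involving arr[lo] with hi moving inward
--             k = hi
--             while lo < k and arr[lo] + arr[k] >= -10000:
--                 if arr[lo] + arr[k] <= 10000:
--                     valid.add(arr[lo] + arr[k])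
--                 k -= 1
--             lo += 1
--     return len(valid)
-- ===== SOURCE B (Python) =====
-- def check_sums(integers):
--     # One structural pass over the sorted deduped list: take each head with its
--     # remaining tail, record every in-range pair sum. No two-pointer pruning.
--     arr = sorted(set(integers))
--     valid = set()
--     while arr:
--         x = arr[0]
--         arr = arr[1:]
--         for y in arr:
--             s = x + y
--             if -10000 <= s <= 10000:
--                 valid.add(s)
--     return len(valid)
-- ===== Notes on version B (the rewrite author's own statement) =====
-- stated objective: simpler
-- what changed: Replaces A's two-pointer window with inward-scanning inner loop and range pruning by a plain head-with-tail pass over the sorted deduped list that records every in-range pair sum into the set.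
import Mathlib
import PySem

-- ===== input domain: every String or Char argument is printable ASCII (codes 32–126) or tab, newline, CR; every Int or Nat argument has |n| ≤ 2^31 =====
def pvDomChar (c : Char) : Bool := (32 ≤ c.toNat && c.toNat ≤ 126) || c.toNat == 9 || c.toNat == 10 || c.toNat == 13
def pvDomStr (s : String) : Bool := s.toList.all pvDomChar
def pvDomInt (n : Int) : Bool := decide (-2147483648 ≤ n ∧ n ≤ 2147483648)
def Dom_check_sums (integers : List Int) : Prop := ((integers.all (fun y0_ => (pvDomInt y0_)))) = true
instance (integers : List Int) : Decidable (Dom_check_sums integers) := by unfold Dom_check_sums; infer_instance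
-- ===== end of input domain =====

-- B replaces A's two-pointer / inward-scan pruning by a plain head-with-tail pass
-- collecting all in-range pair sums (objective: simpler; same asymptotic cost).

-- ===== PORT A =====
-- inner 'while lo < k and arr[lo] + arr[k] >= -10000' loop; lo, k are the Python
-- indices (always ≥ 0 and < len(arr) when read, so getD is exact for arr[·])
def pvInnerA (arr : List Int) (lo : Nat) (k : Nat) (valid : PySem.Set Int) : PySem.Set Int :=
  if _h : lo < k then
    if arr.getD lo 0 + arr.getD k 0 ≥ -10000 then
      pvInnerA arr lo (k - 1)
        (if arr.getD lo 0 + arr.getD k 0 ≤ 10000 then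
          PySem.Set.add valid (arr.getD lo 0 + arr.getD k 0) else valid)
    else valid
  else valid
termination_by k
decreasing_by omega

-- outer 'while lo < hi' loop
def pvOuterA (arr : List Int) (lo : Nat) (hi : Nat) (valid : PySem.Set Int) : PySem.Set Int :=
  if h : lo < hi then
    if arr.getD lo 0 + arr.getD hi 0 < -10000 then pvOuterA arr (lo + 1) hi valid
    else if arr.getD lo 0 + arr.getD hi 0 > 10000 then pvOuterA arr lo (hi - 1) valid
    else pvOuterA arr (lo + 1) hi (pvInnerA arr lo hi valid)
  else valid
termination_by hi - lo
decreasing_by all_goals omega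

-- Python's hi = len(arr) - 1 is -1 on the empty list; Nat's 0 - 1 = 0 gives the
-- same behaviour since the loop guard 'lo < hi' fails either way.
def check_sums (integers : List Int) : Int :=
  let arr := PySem.List.sorted (PySem.Set.ofList integers) (fun x => x) false
  ((pvOuterA arr 0 (arr.length - 1) PySem.Set.empty).length : Int)

-- ===== PORT B =====
-- 'for y in arr: … valid.add(s)' body of Source B
def pvCollectB (x : Int) (t : List Int) (valid : PySem.Set Int) : PySem.Set Int :=
  t.foldl (fun v y => if -10000 ≤ x + y ∧ x + y ≤ 10000 then PySem.Set.add v (x + y) else v) valid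

-- 'while arr: x = arr[0]; arr = arr[1:]; …' of Source B (structural head/tail pass)
def pvPairsB : List Int → PySem.Set Int → PySem.Set Int
  | [], valid => valid
  | x :: t, valid => pvPairsB t (pvCollectB x t valid)

def check_sums_alt (integers : List Int) : Int :=
  let arr := PySem.List.sorted (PySem.Set.ofList integers) (fun x => x) false
  ((pvPairsB arr PySem.Set.empty).length : Int)

-- ===== PRECONDITION & SPEC =====
def Spec_check_sums (integers : List Int) (out : Int) : Prop := out = check_sums_alt integers
instance (integers : List Int) (out : Int) : Decidable (Spec_check_sums integers out) := by unfold Spec_check_sums; infer_instance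

-- ===== CLAIM (what is proved, stated in full; the proofs are below) =====
def Claim_equal_check_sums : Prop := ∀ (integers : List Int), Dom_check_sums integers → Spec_check_sums integers (check_sums integers)

-- ===== LEMMAS AND PROOFS =====

-- monotone-by-index reading of a ≤-pairwise list, via getD
theorem pvMonoOfPairwise (arr : List Int) (hp : arr.Pairwise (· ≤ ·)) :
    ∀ i j : Nat, i ≤ j → j < arr.length → arr.getD i 0 ≤ arr.getD j 0 := by
  intro i j hij hj
  rcases Nat.eq_or_lt_of_le hij with h | h
  · subst h; exact le_refl _
  · rw [List.getD_eq_getElem _ _ (Nat.lt_of_lt_of_le h (Nat.le_of_lt_succ (Nat.lt_succ_of_lt hj))),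
      List.getD_eq_getElem _ _ hj]
    exact List.pairwise_iff_getElem.mp hp i j _ _ h

theorem pvNodupCollectB (x : Int) (t : List Int) (v : PySem.Set Int) (hv : v.Nodup) :
    (pvCollectB x t v).Nodup := by
  induction t generalizing v with
  | nil => exact hv
  | cons y t ih =>
    simp only [pvCollectB, List.foldl]
    apply ih
    split
    · exact PySem.Set.nodup_add v _ hv
    · exact hv

theorem pvMemCollectB (x : Int) (t : List Int) (v : PySem.Set Int) (y : Int) :
    y ∈ pvCollectB x t v ↔ y ∈ v ∨ ∃ z ∈ t, y = x + z ∧ -10000 ≤ y ∧ y ≤ 10000 := by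
  induction t generalizing v with
  | nil => simp [pvCollectB]
  | cons z t ih =>
    simp only [pvCollectB, List.foldl] at *
    rw [ih]
    constructor
    · rintro (hv | ⟨w, hw, rfl, hb⟩)
      · split at hv
        · rcases (PySem.Set.mem_add _ _ _).mp hv with h | h
          · exact Or.inl h
          · subst h; exact Or.inr ⟨z, by simp, rfl, by omega⟩
        · exact Or.inl hv
      · exact Or.inr ⟨w, by simp [hw], rfl, hb⟩
    · rintro (hv | ⟨w, hw, rfl, hb⟩)
      · refine Or.inl ?_
        split
        · exact (PySem.Set.mem_add _ _ _).mpr (Or.inl hv)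
        · exact hv
      · rcases List.mem_cons.mp hw with rfl | hw
        · refine Or.inl ?_
          have : (-10000 ≤ x + w ∧ x + w ≤ 10000) := hb
          simp only [if_pos this]
          exact (PySem.Set.mem_add _ _ _).mpr (Or.inr rfl)
        · exact Or.inr ⟨w, hw, rfl, hb⟩

theorem pvNodupPairsB (l : List Int) (v : PySem.Set Int) (hv : v.Nodup) :
    (pvPairsB l v).Nodup := by
  induction l generalizing v with
  | nil => exact hv
  | cons x t ih => exact ih _ (pvNodupCollectB x t v hv)

theorem pvMemPairsB (l : List Int) (v : PySem.Set Int) (y : Int) :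
    y ∈ pvPairsB l v ↔ y ∈ v ∨
      ∃ i j : Nat, i < j ∧ j < l.length ∧ y = l.getD i 0 + l.getD j 0 ∧ -10000 ≤ y ∧ y ≤ 10000 := by
  induction l generalizing v with
  | nil => simp [pvPairsB]
  | cons x t ih =>
    simp only [pvPairsB]
    rw [ih, pvMemCollectB]
    constructor
    · rintro ((hv | ⟨z, hz, rfl, hb⟩) | ⟨i, j, hij, hj, rfl, hb⟩)
      · exact Or.inl hv
      · rcases List.mem_iff_getElem.mp hz with ⟨j, hj, rfl⟩
        refine Or.inr ⟨0, j + 1, by omega, by simp; omega, ?_, hb⟩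
        simp [List.getD, List.getElem?_eq_getElem hj]
      · refine Or.inr ⟨i + 1, j + 1, by omega, by simp; omega, ?_, hb⟩
        simp
    · rintro (hv | ⟨i, j, hij, hj, rfl, hb⟩)
      · exact Or.inl (Or.inl hv)
      · match i, j with
        | 0, j + 1 =>
          refine Or.inl (Or.inr ⟨t.getD j 0, ?_, by simp, hb⟩)
          have hjt : j < t.length := by simpa using hj
          rw [List.getD_eq_getElem _ _ hjt]; exact List.getElem_mem _
        | i + 1, j + 1 =>
          exact Or.inr ⟨i, j, by omega, by simpa using hj, by simp, hb⟩

theorem pvMemInnerA (arr : List Int) (lo k : Nat) (v : PySem.Set Int)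
    (hs : ∀ i j : Nat, i ≤ j → j < arr.length → arr.getD i 0 ≤ arr.getD j 0)
    (hk : k < arr.length) (y : Int) :
    y ∈ pvInnerA arr lo k v ↔ y ∈ v ∨
      ∃ j : Nat, lo < j ∧ j ≤ k ∧ y = arr.getD lo 0 + arr.getD j 0 ∧ -10000 ≤ y ∧ y ≤ 10000 := by
  induction k using Nat.strong_induction_on generalizing v with
  | _ k ihk =>
  rw [pvInnerA]
  by_cases h : lo < k
  · rw [dif_pos h]
    by_cases hge : arr.getD lo 0 + arr.getD k 0 ≥ -10000
    · rw [if_pos hge, ihk (k - 1) (by omega) _ (by omega)]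
      have hsplit : ∀ j : Nat, (lo < j ∧ j ≤ k) ↔ (lo < j ∧ j ≤ k - 1) ∨ j = k := by
        intro j; omega
      constructor
      · rintro (hv | ⟨j, hj1, hj2, rfl, hb⟩)
        · split at hv
          · rcases (PySem.Set.mem_add _ _ _).mp hv with h' | h'
            · exact Or.inl h'
            · exact Or.inr ⟨k, h, le_refl _, h', by omega⟩
          · exact Or.inl hv
        · exact Or.inr ⟨j, hj1, by omega, rfl, hb⟩
      · rintro (hv | ⟨j, hj1, hj2, rfl, hb⟩)
        · refine Or.inl ?_
          split
          · exact (PySem.Set.mem_add _ _ _).mpr (Or.inl hv)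
          · exact hv
        · rcases (hsplit j).mp ⟨hj1, hj2⟩ with ⟨h1, h2⟩ | rfl
          · exact Or.inr ⟨j, h1, h2, rfl, hb⟩
          · refine Or.inl ?_
            rw [if_pos (by omega)]
            exact (PySem.Set.mem_add _ _ _).mpr (Or.inr rfl)
    · rw [if_neg hge]
      constructor
      · exact Or.inl
      · rintro (hv | ⟨j, hj1, hj2, rfl, hb⟩)
        · exact hv
        · exfalso
          have := hs j k hj2 hk
          omega
  · rw [dif_neg h]
    constructor
    · exact Or.inl
    · rintro (hv | ⟨j, hj1, hj2, _, _⟩)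
      · exact hv
      · omega

theorem pvNodupInnerA (arr : List Int) (lo k : Nat) (v : PySem.Set Int) (hv : v.Nodup) :
    (pvInnerA arr lo k v).Nodup := by
  induction k using Nat.strong_induction_on generalizing v with
  | _ k ihk =>
  rw [pvInnerA]
  split
  · split
    · apply ihk (k - 1) (by omega)
      split
      · exact PySem.Set.nodup_add v _ hv
      · exact hv
    · exact hv
  · exact hv

theorem pvMemOuterA (arr : List Int) (lo hi : Nat) (v : PySem.Set Int)
    (hs : ∀ i j : Nat, i ≤ j → j < arr.length → arr.getD i 0 ≤ arr.getD j 0)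
    (hhi : hi < arr.length) (y : Int) :
    y ∈ pvOuterA arr lo hi v ↔ y ∈ v ∨
      ∃ i j : Nat, lo ≤ i ∧ i < j ∧ j ≤ hi ∧ y = arr.getD i 0 + arr.getD j 0 ∧
        -10000 ≤ y ∧ y ≤ 10000 := by
  induction lo, hi, v using pvOuterA.induct arr with
  | case1 lo hi v h hlt ih =>
    -- s < -10000 : drop lo
    rw [pvOuterA, dif_pos h, if_pos hlt, ih hhi]
    constructor
    · rintro (hv | ⟨i, j, h1, h2, h3, rfl, hb⟩)
      · exact Or.inl hv
      · exact Or.inr ⟨i, j, by omega, h2, h3, rfl, hb⟩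
    · rintro (hv | ⟨i, j, h1, h2, h3, rfl, hb⟩)
      · exact Or.inl hv
      · rcases Nat.eq_or_lt_of_le h1 with rfl | h1'
        · exfalso
          have := hs j hi h3 hhi
          omega
        · exact Or.inr ⟨i, j, h1', h2, h3, rfl, hb⟩
  | case2 lo hi v h hge hgt ih =>
    -- s > 10000 : drop hi
    rw [pvOuterA, dif_pos h, if_neg hge, if_pos hgt, ih (by omega)]
    constructor
    · rintro (hv | ⟨i, j, h1, h2, h3, rfl, hb⟩)
      · exact Or.inl hv
      · exact Or.inr ⟨i, j, h1, h2, by omega, rfl, hb⟩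
    · rintro (hv | ⟨i, j, h1, h2, h3, rfl, hb⟩)
      · exact Or.inl hv
      · rcases Nat.eq_or_lt_of_le h3 with rfl | h3'
        · exfalso
          have := hs lo i h1 (by omega)
          omega
        · exact Or.inr ⟨i, j, h1, h2, by omega, rfl, hb⟩
  | case3 lo hi v h hge hle ih =>
    -- in-range : inner scan for lo, then lo + 1
    rw [pvOuterA, dif_pos h, if_neg hge, if_neg hle, ih hhi]
    rw [pvMemInnerA arr lo hi v hs hhi]
    constructor
    · rintro ((hv | ⟨j, hj1, hj2, rfl, hb⟩) | ⟨i, j, h1, h2, h3, rfl, hb⟩)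
      · exact Or.inl hv
      · exact Or.inr ⟨lo, j, le_refl _, hj1, hj2, rfl, hb⟩
      · exact Or.inr ⟨i, j, by omega, h2, h3, rfl, hb⟩
    · rintro (hv | ⟨i, j, h1, h2, h3, rfl, hb⟩)
      · exact Or.inl (Or.inl hv)
      · rcases Nat.eq_or_lt_of_le h1 with rfl | h1'
        · exact Or.inl (Or.inr ⟨j, h2, h3, rfl, hb⟩)
        · exact Or.inr ⟨i, j, h1', h2, h3, rfl, hb⟩
  | case4 lo hi v h =>
    rw [pvOuterA, dif_neg h]
    constructor
    · exact Or.inl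
    · rintro (hv | ⟨i, j, h1, h2, h3, _, _⟩)
      · exact hv
      · omega

theorem pvNodupOuterA (arr : List Int) (lo hi : Nat) (v : PySem.Set Int) (hv : v.Nodup) :
    (pvOuterA arr lo hi v).Nodup := by
  induction lo, hi, v using pvOuterA.induct arr with
  | case1 lo hi v h hlt ih => rw [pvOuterA, dif_pos h, if_pos hlt]; exact ih hv
  | case2 lo hi v h hge hgt ih => rw [pvOuterA, dif_pos h, if_neg hge, if_pos hgt]; exact ih hv
  | case3 lo hi v h hge hle ih =>
    rw [pvOuterA, dif_pos h, if_neg hge, if_neg hle]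
    exact ih (pvNodupInnerA arr lo hi v hv)
  | case4 lo hi v h => rw [pvOuterA, dif_neg h]; exact hv

-- the two loop results are permutations of each other on any strictly sorted list
theorem pvMain (arr : List Int) (hp : arr.Pairwise (· < ·)) :
    ((pvOuterA arr 0 (arr.length - 1) PySem.Set.empty).length : Int)
      = ((pvPairsB arr PySem.Set.empty).length : Int) := by
  have hs : ∀ i j : Nat, i ≤ j → j < arr.length → arr.getD i 0 ≤ arr.getD j 0 :=
    pvMonoOfPairwise arr (hp.imp (fun h => le_of_lt h))
  by_cases harr : arr = []
  · subst harr
    rw [pvOuterA, dif_neg (by simp)]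
    rfl
  · have hlen : arr.length - 1 < arr.length := by
      have := List.length_pos_iff.mpr harr; omega
    have hnodupE : (PySem.Set.empty : PySem.Set Int).Nodup := List.nodup_nil
    have hperm : (pvOuterA arr 0 (arr.length - 1) PySem.Set.empty).Perm
        (pvPairsB arr PySem.Set.empty) := by
      apply (List.perm_ext_iff_of_nodup
        (pvNodupOuterA arr 0 (arr.length - 1) PySem.Set.empty hnodupE)
        (pvNodupPairsB arr PySem.Set.empty hnodupE)).mpr
      intro y
      rw [pvMemOuterA arr 0 (arr.length - 1) PySem.Set.empty hs hlen, pvMemPairsB]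
      have hmem : y ∉ (PySem.Set.empty : PySem.Set Int) := List.not_mem_nil
      constructor
      · rintro (hf | ⟨i, j, _, h2, h3, rfl, hb⟩)
        · exact absurd hf hmem
        · exact Or.inr ⟨i, j, h2, by omega, rfl, hb⟩
      · rintro (hf | ⟨i, j, h2, h3, rfl, hb⟩)
        · exact absurd hf hmem
        · exact Or.inr ⟨i, j, by omega, h2, by omega, rfl, hb⟩
    exact_mod_cast hperm.length_eq

-- ===== VERDICT (by name: the statement is the Claim_ definition above) =====
theorem check_sums_spec : Claim_equal_check_sums := by
  intro integers _
  simp only [Spec_check_sums, check_sums, check_sums_alt]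
  exact pvMain _ (PySem.List.sorted_ofList_pairwise_lt (xs := integers))
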